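-- pv_equiv track=rewrite | github.com/Seyud/MiNavBarImmerse | scripts/sort_release_files.py | sort_activity_rule
-- ===== SOURCE A (Python) =====
-- from collections import defaultdict, OrderedDict
--
-- def sort_activity_rule(rule_config):
--     """
--     排序单个活动规则
--     """
--     if not isinstance(rule_config, dict):
--         return rule_config
--
--     sorted_config = OrderedDict()
--
--     # 活动规则的字段顺序：mode, color
--     field_order = ["mode", "color"]
--
--     # 先添加 mode 和 color
--     for field in field_order:
--         if field in rule_config:
--             sorted_config[field] = rule_config[field]
--
--     # 添加其他字段（按字母顺序）
--     other_keys = [k for k in rule_config.keys() if k not in field_order]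
--     for key in sorted(other_keys):
--         sorted_config[key] = rule_config[key]
--
--     return sorted_config
-- ===== SOURCE B (Python) =====
-- from collections import OrderedDict
--
-- def sort_activity_rule(rule_config):
--     """
--     排序单个活动规则 — one pass over items(), insertion-sorting the non-priority pairs.
--     """
--     if not isinstance(rule_config, dict):
--         return rule_config
--
--     mode = []
--     color = []
--     others = []  # kept sorted by key via linear insertion
--     for k, v in rule_config.items():
--         if k == "mode":
--             mode.append((k, v))
--         elif k == "color":
--             color.append((k, v))
--         else:
--             i = 0
--             while i < len(others) and others[i][0] < k:
--                 i += 1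
--             others.insert(i, (k, v))
--     return OrderedDict(mode + color + others)
-- ===== Notes on version B (the rewrite author's own statement) =====
-- stated objective: alternative
-- what changed: Replaces A's two-phase build (priority-field loop with dict lookups, then sorted() over the remaining keys and a second append loop) with a single pass over items() that captures the mode/color pairs directly and maintains the other pairs in a list kept sorted by linear insertion (insertion sort, no sorted() call and no key lookups); trades timsort's O(n log n) for O(n^2) insertions on the (tiny) rule dicts.
import Mathlib
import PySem

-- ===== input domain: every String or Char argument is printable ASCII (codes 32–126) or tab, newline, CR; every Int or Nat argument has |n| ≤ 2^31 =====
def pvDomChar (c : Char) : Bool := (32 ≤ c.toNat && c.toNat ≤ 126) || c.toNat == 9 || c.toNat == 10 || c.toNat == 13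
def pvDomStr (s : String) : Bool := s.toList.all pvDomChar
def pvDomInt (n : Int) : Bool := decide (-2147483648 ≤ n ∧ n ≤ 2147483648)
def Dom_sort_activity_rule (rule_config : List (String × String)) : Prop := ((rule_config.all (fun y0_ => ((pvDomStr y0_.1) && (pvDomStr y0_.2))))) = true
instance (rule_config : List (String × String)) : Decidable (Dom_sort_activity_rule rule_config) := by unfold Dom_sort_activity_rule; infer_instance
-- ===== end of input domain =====

-- B makes ONE pass over the items, capturing the mode/color pairs directly and keeping the
-- other pairs in a list sorted by linear insertion — no sorted() call and no dict lookups,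
-- instead of A's priority-field loop followed by a sort-and-append of the remaining keys.

-- ===== PORT A =====
-- dict lookup rule_config[k] (keys unique under Pre_, so first match)
def pvLookup (rule_config : List (String × String)) (k : String) : String :=
  ((rule_config.find? (fun p => p.1 == k)).map Prod.snd).getD ""

def sort_activity_rule (rule_config : List (String × String)) : List (String × String) :=
  let field_order : List String := ["mode", "color"]
  -- for field in field_order: if field in rule_config: sorted_config[field] = rule_config[field]
  let sorted_config :=
    field_order.foldl (fun acc field =>
      if (rule_config.map Prod.fst).contains field then
        acc ++ [(field, pvLookup rule_config field)]
      else acc) ([] : List (String × String))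
  -- other_keys = [k for k in rule_config.keys() if k not in field_order]
  let other_keys := (rule_config.map Prod.fst).filter (fun k => !field_order.contains k)
  -- for key in sorted(other_keys): sorted_config[key] = rule_config[key]
  (PySem.List.sorted other_keys (fun k => k)).foldl
    (fun acc key => acc ++ [(key, pvLookup rule_config key)]) sorted_config

-- ===== PORT B =====
-- the while/insert body: skip entries whose key is < k, insert (k,v) before the first key ≥ k
def pvInsertPair (p : String × String) : List (String × String) → List (String × String)
  | [] => [p]
  | q :: rest => if q.1 < p.1 then q :: pvInsertPair p rest else p :: q :: rest

-- the body of B's single for-loop over items()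
def pvStep (st : List (String × String) × List (String × String) × List (String × String))
    (kv : String × String) :
    List (String × String) × List (String × String) × List (String × String) :=
  if kv.1 == "mode" then (st.1 ++ [kv], st.2.1, st.2.2)
  else if kv.1 == "color" then (st.1, st.2.1 ++ [kv], st.2.2)
  else (st.1, st.2.1, pvInsertPair kv st.2.2)

def sort_activity_rule_alt (rule_config : List (String × String)) : List (String × String) :=
  let st := rule_config.foldl pvStep ([], [], [])
  st.1 ++ st.2.1 ++ st.2.2

-- ===== PRECONDITION & SPEC =====
-- Pre_ excludes association lists with duplicate keys: they represent no Python dict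
-- (a duplicate key collapses before A even runs), so no behaviour there is A's.
def Pre_sort_activity_rule (rule_config : List (String × String)) : Prop :=
  (rule_config.map Prod.fst).Nodup
instance (rule_config : List (String × String)) : Decidable (Pre_sort_activity_rule rule_config) := by unfold Pre_sort_activity_rule; infer_instance

def pvWitness_sort_activity_rule : (List (String × String)) :=
  [("color", "c"), ("zeta", "z"), ("mode", "m"), ("alpha", "a")]

def Spec_sort_activity_rule (rule_config : List (String × String)) (out : List (String × String)) : Prop := out = sort_activity_rule_alt rule_config
instance (rule_config : List (String × String)) (out : List (String × String)) : Decidable (Spec_sort_activity_rule rule_config out) := by unfold Spec_sort_activity_rule; infer_instance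

-- ===== CLAIM (what is proved, stated in full; the proofs are below) =====
def Claim_equal_sort_activity_rule : Prop := ∀ (rule_config : List (String × String)), Dom_sort_activity_rule rule_config → Pre_sort_activity_rule rule_config → Spec_sort_activity_rule rule_config (sort_activity_rule rule_config)

-- ===== LEMMAS AND PROOFS =====

-- strict order on pairs by key
def pvR (a b : String × String) : Prop := a.1 < b.1

-- two lists that are permutations of each other and both strictly sorted by key are equal
theorem eq_of_perm_of_pairwise_lt (l₁ l₂ : List (String × String))
    (h : l₁.Perm l₂) (s₁ : l₁.Pairwise pvR) (s₂ : l₂.Pairwise pvR) : l₁ = l₂ := by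
  exact h.eq_of_pairwise (fun a b _ _ h1 h2 => absurd (lt_trans h1 h2) (lt_irrefl _)) s₁ s₂

theorem insertPair_perm (p : String × String) (l : List (String × String)) :
    (pvInsertPair p l).Perm (p :: l) := by
  induction l with
  | nil => simp [pvInsertPair]
  | cons q rest ih =>
    simp only [pvInsertPair]
    split_ifs with h
    · exact ((ih.cons q).trans (List.Perm.swap p q rest))
    · exact List.Perm.refl _

theorem insertPair_pairwise (p : String × String) (l : List (String × String))
    (hs : l.Pairwise pvR) (hne : ∀ q ∈ l, q.1 ≠ p.1) :
    (pvInsertPair p l).Pairwise pvR := by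
  induction l with
  | nil => simp [pvInsertPair]
  | cons q rest ih =>
    rcases List.pairwise_cons.mp hs with ⟨hq, hrest⟩
    simp only [pvInsertPair]
    split_ifs with h
    · refine List.pairwise_cons.mpr ⟨?_, ih hrest (fun x hx => hne x (List.mem_cons_of_mem _ hx))⟩
      intro x hx
      rcases List.mem_cons.mp ((insertPair_perm p rest).mem_iff.mp hx) with rfl | hx'
      · exact h
      · exact hq x hx'
    · have hpq : p.1 < q.1 :=
        lt_of_le_of_ne (le_of_not_gt h) (fun e => hne q List.mem_cons_self e.symm)
      refine List.pairwise_cons.mpr ⟨?_, hs⟩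
      intro x hx
      rcases List.mem_cons.mp hx with rfl | hx'
      · exact hpq
      · exact lt_trans hpq (hq x hx')

-- B's fold, characterised: the three accumulators
theorem fold_char (rc : List (String × String)) :
    ∀ (m c o : List (String × String)),
      rc.foldl pvStep (m, c, o) =
        (m ++ rc.filter (fun kv => kv.1 == "mode"),
         c ++ rc.filter (fun kv => kv.1 == "color"),
         (rc.filter (fun kv => !(kv.1 == "mode" || kv.1 == "color"))).foldl
           (fun o kv => pvInsertPair kv o) o) := by
  induction rc with
  | nil => intro m c o; simp
  | cons kv rest ih =>
    intro m c o
    by_cases h1 : kv.1 = "mode"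
    · simp [pvStep, h1, ih]
    · by_cases h2 : kv.1 = "color"
      · simp [pvStep, h1, h2, ih]
      · simp [pvStep, h1, h2, ih]

-- the insertion fold: permutation and sortedness
theorem insFold_perm (l : List (String × String)) :
    ∀ acc, (l.foldl (fun o kv => pvInsertPair kv o) acc).Perm (acc ++ l) := by
  induction l with
  | nil => intro acc; simp
  | cons x l ih =>
    intro acc
    simp only [List.foldl_cons]
    exact (ih _).trans (((insertPair_perm x acc).append_right l).trans List.perm_middle.symm)

theorem insFold_pairwise (l : List (String × String)) :
    ∀ acc, acc.Pairwise pvR → (∀ p ∈ l, ∀ q ∈ acc, q.1 ≠ p.1) →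
      ((l.map Prod.fst).Nodup) →
      (l.foldl (fun o kv => pvInsertPair kv o) acc).Pairwise pvR := by
  induction l with
  | nil => intro acc hacc _ _; simpa using hacc
  | cons x l ih =>
    intro acc hacc hdisj hnd
    simp only [List.map_cons, List.nodup_cons] at hnd
    refine ih (pvInsertPair x acc)
      (insertPair_pairwise x acc hacc (fun q hq => hdisj x List.mem_cons_self q hq)) ?_ hnd.2
    intro p hp q hq
    rcases List.mem_cons.mp ((insertPair_perm x acc).mem_iff.mp hq) with rfl | hq'
    · exact fun e => hnd.1 (e ▸ List.mem_map_of_mem hp)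
    · exact hdisj p (List.mem_cons_of_mem _ hp) q hq'

-- dict lookup of a present key, under unique keys
theorem lookup_of_mem (rc : List (String × String)) (hnd : (rc.map Prod.fst).Nodup) :
    ∀ a b, (a, b) ∈ rc → pvLookup rc a = b := by
  induction rc with
  | nil => intro a b h; simp at h
  | cons q rest ih =>
    intro a b h
    simp only [List.map_cons, List.nodup_cons] at hnd
    rcases List.mem_cons.mp h with rfl | h'
    · simp [pvLookup]
    · have hne : q.1 ≠ a := fun e => hnd.1 (e ▸ List.mem_map_of_mem h')
      simp only [pvLookup]
      rw [List.find?_cons_of_neg (by simpa using hne)]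
      exact ih hnd.2 a b h'

-- a key's filter singleton, under unique keys
theorem filter_single (f : String) (rc : List (String × String)) (hnd : (rc.map Prod.fst).Nodup) :
    rc.filter (fun kv => kv.1 == f) =
      (if (rc.map Prod.fst).contains f then [(f, pvLookup rc f)] else []) := by
  induction rc with
  | nil => simp
  | cons q rest ih =>
    simp only [List.map_cons, List.nodup_cons] at hnd
    obtain ⟨qa, qb⟩ := q
    by_cases h : qa = f
    · subst h
      have hrest : rest.filter (fun kv => kv.1 == qa) = [] := by
        apply List.filter_eq_nil_iff.mpr
        intro kv hkv
        simp only [beq_iff_eq]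
        intro e
        apply hnd.1
        have hm : kv.1 ∈ List.map Prod.fst rest := List.mem_map_of_mem hkv
        rwa [e] at hm
      have hlk : pvLookup ((qa, qb) :: rest) qa = qb := by
        simp only [pvLookup]
        rw [List.find?_cons_of_pos (by simp)]
        rfl
      simp [hrest, hlk]
    · have hl : pvLookup ((qa, qb) :: rest) f = pvLookup rest f := by
        simp only [pvLookup]
        rw [List.find?_cons_of_neg (by simpa using h)]
      rw [List.filter_cons_of_neg (by simpa using h), ih hnd.2]
      simp only [List.map_cons, hl,
        show ((qa :: List.map Prod.fst rest).contains f) = ((List.map Prod.fst rest).contains f) from by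
          rw [List.contains_cons]
          simp [show (f == qa) = false from by simp [Ne.symm h]]]

-- map fst commutes with filter-on-key
theorem map_fst_filter (p : String → Bool) (rc : List (String × String)) :
    (rc.map Prod.fst).filter p = (rc.filter (fun kv => p kv.1)).map Prod.fst := by
  induction rc with
  | nil => rfl
  | cons q rest ih =>
    by_cases h : p q.1 <;> simp [h, ih]

theorem main_eq (rc : List (String × String)) (hnd : (rc.map Prod.fst).Nodup) :
    sort_activity_rule rc = sort_activity_rule_alt rc := by
  have hBfilter :
      (fun kv : String × String => !(kv.1 == "mode" || kv.1 == "color")) =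
      (fun kv : String × String => !(["mode", "color"] : List String).contains kv.1) := by
    funext kv
    by_cases h1 : kv.1 = "mode"
    · simp [h1]
    · by_cases h2 : kv.1 = "color" <;> simp [h1, h2]
  -- name the pieces
  set others := rc.filter (fun kv => !(["mode", "color"] : List String).contains kv.1) with hoth
  have hothnd : (others.map Prod.fst).Nodup :=
    (List.Sublist.map Prod.fst List.filter_sublist).nodup hnd
  -- B in canonical form
  have hB : sort_activity_rule_alt rc =
      rc.filter (fun kv => kv.1 == "mode") ++ rc.filter (fun kv => kv.1 == "color") ++
        others.foldl (fun o kv => pvInsertPair kv o) [] := by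
    simp only [sort_activity_rule_alt, fold_char rc [] [] [], hBfilter, List.nil_append, hoth]
  -- A in canonical form
  have hA : sort_activity_rule rc =
      (["mode", "color"].filter (fun f => (rc.map Prod.fst).contains f)).map
          (fun f => (f, pvLookup rc f)) ++
        (PySem.List.sorted ((rc.map Prod.fst).filter
            (fun k => !(["mode", "color"] : List String).contains k)) (fun k => k)).map
          (fun k => (k, pvLookup rc k)) := by
    simp only [sort_activity_rule]
    rw [PySem.List.foldl_append_if, PySem.List.foldl_append_singleton_eq_map]
    simp only [List.nil_append]
  rw [hA, hB]
  -- priority parts agree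
  have hprio :
      (["mode", "color"].filter (fun f => (rc.map Prod.fst).contains f)).map
          (fun f => (f, pvLookup rc f)) =
        rc.filter (fun kv => kv.1 == "mode") ++ rc.filter (fun kv => kv.1 == "color") := by
    rw [filter_single "mode" rc hnd, filter_single "color" rc hnd]
    by_cases hm : "mode" ∈ rc.map Prod.fst <;>
      by_cases hc : "color" ∈ rc.map Prod.fst <;>
        simp [hm, hc]
  -- sorted parts agree
  have hkeys : (rc.map Prod.fst).filter (fun k => !(["mode", "color"] : List String).contains k)
      = others.map Prod.fst := map_fst_filter _ rc
  have hsorted :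
      (PySem.List.sorted ((rc.map Prod.fst).filter
          (fun k => !(["mode", "color"] : List String).contains k)) (fun k => k)).map
        (fun k => (k, pvLookup rc k)) =
      others.foldl (fun o kv => pvInsertPair kv o) [] := by
    apply eq_of_perm_of_pairwise_lt
    · -- permutation: both are permutations of `others`
      have h1 : (PySem.List.sorted ((rc.map Prod.fst).filter
            (fun k => !(["mode", "color"] : List String).contains k)) (fun k => k)).Perm
            (others.map Prod.fst) := by
        rw [← hkeys]; exact PySem.List.sorted_perm _ _ _
      have h2 : ((others.map Prod.fst).map (fun k => (k, pvLookup rc k))).Perm others := by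
        have : (others.map Prod.fst).map (fun k => (k, pvLookup rc k)) = others := by
          rw [List.map_map]
          refine List.map_congr_left ?_ |>.trans (List.map_id others)
          intro kv hkv
          have hmem : kv ∈ rc := List.mem_of_mem_filter hkv
          have : pvLookup rc kv.1 = kv.2 := lookup_of_mem rc hnd kv.1 kv.2 (by simpa using hmem)
          simp [Function.comp, this]
        rw [this]
      exact ((h1.map _).trans h2).trans (insFold_perm others []).symm
    · -- strict sortedness of the sorted-keys map
      have hnds : (PySem.List.sorted ((rc.map Prod.fst).filter
            (fun k => !(["mode", "color"] : List String).contains k)) (fun k => k)).Nodup := by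
        refine (PySem.List.sorted_perm _ _ _).symm.nodup ?_
        rw [hkeys]; exact hothnd
      have hle := PySem.List.sorted_pairwise ((rc.map Prod.fst).filter
            (fun k => !(["mode", "color"] : List String).contains k)) (fun k => k)
      rw [List.pairwise_map]
      refine List.Pairwise.imp_of_mem ?_ (hle.and hnds)
      intro a b _ _ hab
      exact lt_of_le_of_ne hab.1 hab.2
    · -- strict sortedness of the insertion fold
      exact insFold_pairwise others [] (by simp) (by simp) hothnd
  rw [hprio, hsorted]

-- ===== VERDICT (by name: the statement is the Claim_ definition above) =====
theorem sort_activity_rule_spec : Claim_equal_sort_activity_rule := by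
  intro rc _ hpre
  exact main_eq rc hpre
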